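-- pv_equiv track=rewrite | github.com/gajicmarija/slicingSurvivability | OMNeT simulation project/rndm/algorithm/cfgGenLib.py | generate_ip_addresses
-- ===== SOURCE A (Python) =====
-- def generate_ip_addresses(ipRange, nIPs):
--     ips = []
--     oct3 = 0
--     oct4 = 1
--     for i in range(0, nIPs):
--         ips.append(ipRange.replace('x.x', '%d.%d' %(oct3, oct4)))
--         oct4 = oct4 + 4
--         if oct4 >= 254:
--             oct3 = oct3 + 1
--             oct4 = 1
--     return ips
-- ===== SOURCE B (Python) =====
-- def generate_ip_addresses(ipRange, nIPs):
--     # Stage 1: generate whole 64-entry blocks of 'oct3.oct4' suffixes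
--     # (oct4 runs 1,5,...,253 per block) until enough are available,
--     # stage 2: truncate and substitute into the template.
--     n = max(nIPs, 0)
--     suffixes = []
--     oct3 = 0
--     while len(suffixes) < n:
--         suffixes.extend('%d.%d' % (oct3, o4) for o4 in range(1, 254, 4))
--         oct3 += 1
--     return [ipRange.replace('x.x', s) for s in suffixes[:n]]
-- ===== Notes on version B (the rewrite author's own statement) =====
-- stated objective: alternative
-- what changed: Replaced the single stateful pass (running oct3/oct4 counters with a reset branch) by staged passes: generate whole 64-entry suffix blocks per oct3 until enough exist, truncate to n, then substitute into the template in a separate pass.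
import Mathlib
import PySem

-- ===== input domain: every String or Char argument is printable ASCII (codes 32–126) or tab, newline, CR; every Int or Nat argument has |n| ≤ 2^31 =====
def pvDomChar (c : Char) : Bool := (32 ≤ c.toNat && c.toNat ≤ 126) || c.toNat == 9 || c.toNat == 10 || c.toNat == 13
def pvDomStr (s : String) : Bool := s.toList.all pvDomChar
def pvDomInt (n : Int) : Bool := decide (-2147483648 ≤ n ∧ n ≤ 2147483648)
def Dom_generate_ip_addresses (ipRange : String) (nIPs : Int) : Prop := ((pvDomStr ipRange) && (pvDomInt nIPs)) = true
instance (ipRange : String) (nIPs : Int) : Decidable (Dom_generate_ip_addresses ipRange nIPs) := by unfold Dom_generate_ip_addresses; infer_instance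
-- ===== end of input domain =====

-- B replaces A's single stateful pass (running oct3/oct4 counters with a reset
-- branch) by staged passes: build whole 64-entry suffix blocks per oct3 until
-- enough exist, truncate to n, then substitute in a separate pass (objective: alternative).

-- ===== PORT A =====
def generate_ip_addresses (ipRange : String) (nIPs : Int) : List String :=
  ((PySem.List.pyRange 0 nIPs 1).foldl
    (fun (st : List String × Int × Int) (_ : Int) =>
      let ips := st.1 ++ [PySem.Str.replace ipRange "x.x"
        (PySem.Int.toStr st.2.1 ++ "." ++ PySem.Int.toStr st.2.2)]
      let oct4 := st.2.2 + 4
      if oct4 ≥ 254 then (ips, st.2.1 + 1, 1) else (ips, st.2.1, oct4))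
    ([], 0, 1)).1

-- ===== PORT B =====
-- one block of 64 suffixes 'oct3.o4' for o4 in range(1, 254, 4)
def pvBlock (oct3 : Int) : List String :=
  (PySem.List.pyRange 1 254 4).map
    (fun o4 => PySem.Int.toStr oct3 ++ "." ++ PySem.Int.toStr o4)

lemma pvBlock_length (oct3 : Int) : (pvBlock oct3).length = 64 := by
  simp [pvBlock, PySem.List.pyRange]

-- the while loop: extend suffixes by blocks until len(suffixes) >= n
def pvBuild (n : Nat) (oct3 : Int) (acc : List String) : List String :=
  if acc.length < n then pvBuild n (oct3 + 1) (acc ++ pvBlock oct3) else acc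
termination_by n - acc.length
decreasing_by simp [pvBlock_length]; omega

def generate_ip_addresses_alt (ipRange : String) (nIPs : Int) : List String :=
  -- n = max(nIPs, 0); suffixes[:n] with n ≥ 0 is List.take
  ((pvBuild (max nIPs 0).toNat 0 []).take (max nIPs 0).toNat).map
    (fun s => PySem.Str.replace ipRange "x.x" s)

-- ===== PRECONDITION & SPEC =====
def Spec_generate_ip_addresses (ipRange : String) (nIPs : Int) (out : List String) : Prop := out = generate_ip_addresses_alt ipRange nIPs
instance (ipRange : String) (nIPs : Int) (out : List String) : Decidable (Spec_generate_ip_addresses ipRange nIPs out) := by unfold Spec_generate_ip_addresses; infer_instance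

-- ===== CLAIM (what is proved, stated in full; the proofs are below) =====
def Claim_equal_generate_ip_addresses : Prop := ∀ (ipRange : String) (nIPs : Int), Dom_generate_ip_addresses ipRange nIPs → Spec_generate_ip_addresses ipRange nIPs (generate_ip_addresses ipRange nIPs)

-- ===== LEMMAS AND PROOFS =====

-- the suffix both versions substitute for loop counter k
def pvSuffix (k : Nat) : String :=
  PySem.Int.toStr ((k / 64 : Nat) : Int) ++ "." ++ PySem.Int.toStr ((1 + 4 * (k % 64) : Nat) : Int)

-- A's loop invariant: after m iterations the state is
-- (first m substituted items, m/64, 1+4*(m%64))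
lemma pv_loop_invariant (ipRange : String) (m : Nat) :
    (List.range m).foldl
      (fun (st : List String × Int × Int) (_ : Nat) =>
        let ips := st.1 ++ [PySem.Str.replace ipRange "x.x"
          (PySem.Int.toStr st.2.1 ++ "." ++ PySem.Int.toStr st.2.2)]
        let oct4 := st.2.2 + 4
        if oct4 ≥ 254 then (ips, st.2.1 + 1, 1) else (ips, st.2.1, oct4))
      ([], 0, 1)
    = ((List.range m).map (fun k => PySem.Str.replace ipRange "x.x" (pvSuffix k)),
       ((m / 64 : Nat) : Int), ((1 + 4 * (m % 64) : Nat) : Int)) := by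
  induction m with
  | zero => simp
  | succ m ih =>
    rw [List.range_succ, List.foldl_append, List.map_append, ih]
    simp only [List.foldl_cons, List.foldl_nil, List.map_cons, List.map_nil]
    by_cases h : m % 64 = 63
    · have h4 : ((1 + 4 * (m % 64) : Nat) : Int) + 4 ≥ 254 := by omega
      simp only [if_pos h4]
      refine Prod.ext ?_ (Prod.ext ?_ ?_) <;> simp [pvSuffix] <;> omega
    · have h4 : ¬ ((1 + 4 * (m % 64) : Nat) : Int) + 4 ≥ 254 := by omega
      simp only [if_neg h4]
      refine Prod.ext ?_ (Prod.ext ?_ ?_) <;> simp [pvSuffix] <;> omega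

-- the inner range(1, 254, 4) enumerated
lemma pv_pyRange_step4 :
    PySem.List.pyRange 1 254 4 = (List.range 64).map (fun t => ((1 + 4 * t : Nat) : Int)) := by
  decide

-- one block extends the 'first 64*j suffixes' prefix to 64*(j+1)
lemma pv_block_extend (j : Nat) :
    (List.range (64 * j)).map pvSuffix ++ pvBlock (j : Int)
      = (List.range (64 * j + 64)).map pvSuffix := by
  rw [List.range_add, List.map_append]
  congr 1
  rw [pvBlock, pv_pyRange_step4, List.map_map, List.map_map]
  apply List.map_congr_left
  intro t ht
  simp only [List.mem_range] at ht
  simp only [Function.comp, pvSuffix]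
  have h1 : (64 * j + t) / 64 = j := by omega
  have h2 : (64 * j + t) % 64 = t := by omega
  rw [h1, h2]

-- characterisation of the while loop: starting from the first 64*j suffixes it
-- yields the first 64*max(j, ceil(n/64)) suffixes
lemma pv_build_eq (n j : Nat) :
    pvBuild n (j : Int) ((List.range (64 * j)).map pvSuffix)
      = (List.range (64 * max j ((n + 63) / 64))).map pvSuffix := by
  by_cases h : 64 * j < n
  · rw [pvBuild]
    simp only [List.length_map, List.length_range, if_pos h]
    have : ((j : Int) + 1) = ((j + 1 : Nat) : Int) := by push_cast; ring
    rw [this, pv_block_extend]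
    have e64 : 64 * j + 64 = 64 * (j + 1) := by ring
    rw [e64, pv_build_eq n (j + 1)]
    have hmax : max (j + 1) ((n + 63) / 64) = max j ((n + 63) / 64) := by omega
    rw [hmax]
  · rw [pvBuild]
    simp only [List.length_map, List.length_range, if_neg h]
    have hmax : max j ((n + 63) / 64) = j := by omega
    rw [hmax]
termination_by n - 64 * j

-- ===== VERDICT (by name: the statement is the Claim_ definition above) =====
theorem generate_ip_addresses_spec : Claim_equal_generate_ip_addresses := by
  intro ipRange nIPs _
  show generate_ip_addresses ipRange nIPs = generate_ip_addresses_alt ipRange nIPs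
  unfold generate_ip_addresses generate_ip_addresses_alt
  by_cases h : nIPs ≤ 0
  · rw [PySem.List.pyRange_one_eq_nil h]
    have hn : (max nIPs 0).toNat = 0 := by omega
    rw [hn]
    simp
  · obtain ⟨m, rfl⟩ : ∃ m : Nat, nIPs = (m : Int) := ⟨nIPs.toNat, by omega⟩
    have hn : (max ((m : Nat) : Int) 0).toNat = m := by omega
    rw [hn, PySem.List.pyRange_zero_natCast, List.foldl_map]
    rw [pv_loop_invariant ipRange m]
    have h0 : ([] : List String) = (List.range (64 * 0)).map pvSuffix := by simp
    rw [show ((0 : Int)) = ((0 : Nat) : Int) from rfl] at *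
    rw [h0, pv_build_eq m 0]
    have hle : m ≤ 64 * max 0 ((m + 63) / 64) := by omega
    rw [← List.map_take, List.take_range, min_eq_left hle, List.map_map]
    rfl
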